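-- pv_equiv track=rewrite | github.com/RiKy252/UBB-CS | Semester 1/Fundamentals of Programming/Practical Work/a4-RiKy252/assignment.py | can_we_form_with_first_i_elements_the_sum_j_boolean_matrix
-- ===== SOURCE A (Python) =====
-- def can_we_form_with_first_i_elements_the_sum_j_boolean_matrix(set_of_positive_integers):
--     number_of_elements = len(set_of_positive_integers)
--     total_sum = sum(set_of_positive_integers)
--     is_it_possible_to_form_current_sum_j_with_first_i_elements = [[False for _ in range(total_sum // 2 + 1)] for _ in range(number_of_elements + 1)]
--     is_it_possible_to_form_current_sum_j_with_first_i_elements[0][0] = True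
--
--     for first_elements in range(1, number_of_elements + 1):
--         for current_sum in range(total_sum // 2 + 1):
--             is_it_possible_to_form_current_sum_j_with_first_i_elements[first_elements][current_sum] = is_it_possible_to_form_current_sum_j_with_first_i_elements[first_elements - 1][current_sum]
--             if set_of_positive_integers[first_elements - 1] <= current_sum:
--                 is_it_possible_to_form_current_sum_j_with_first_i_elements[first_elements][current_sum] = is_it_possible_to_form_current_sum_j_with_first_i_elements[first_elements][current_sum] or is_it_possible_to_form_current_sum_j_with_first_i_elements[first_elements - 1][current_sum - set_of_positive_integers[first_elements - 1]]
--     return is_it_possible_to_form_current_sum_j_with_first_i_elements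
-- ===== SOURCE B (Python) =====
-- def can_we_form_with_first_i_elements_the_sum_j_boolean_matrix(set_of_positive_integers):
--     cap = sum(set_of_positive_integers) // 2
--     reachable = {0}
--     rows = [[j in reachable for j in range(cap + 1)]]
--     for element in set_of_positive_integers:
--         reachable |= {r + element for r in reachable if r + element <= cap}
--         rows.append([j in reachable for j in range(cap + 1)])
--     return rows
-- ===== Notes on version B (the rewrite author's own statement) =====
-- stated objective: alternative
-- what changed: Replaces the (n+1)x(cap+1) cell-by-cell DP recurrence (each cell from two previous-row cells) with a running set of reachable sums capped at total_sum//2, each output row being the membership vector of that set.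
-- outside the precondition, e.g. on can_we_form_with_first_i_elements_the_sum_j_boolean_matrix([-2]): A raises IndexError, B returns [[], []]; on can_we_form_with_first_i_elements_the_sum_j_boolean_matrix([1, -1]): A returns [[True], [True], [True]], B returns [[True], [True], [True]]; on can_we_form_with_first_i_elements_the_sum_j_boolean_matrix([3, -1]): A raises IndexError, B returns [[True, False], [True, False], [True, False]]
import Mathlib
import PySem

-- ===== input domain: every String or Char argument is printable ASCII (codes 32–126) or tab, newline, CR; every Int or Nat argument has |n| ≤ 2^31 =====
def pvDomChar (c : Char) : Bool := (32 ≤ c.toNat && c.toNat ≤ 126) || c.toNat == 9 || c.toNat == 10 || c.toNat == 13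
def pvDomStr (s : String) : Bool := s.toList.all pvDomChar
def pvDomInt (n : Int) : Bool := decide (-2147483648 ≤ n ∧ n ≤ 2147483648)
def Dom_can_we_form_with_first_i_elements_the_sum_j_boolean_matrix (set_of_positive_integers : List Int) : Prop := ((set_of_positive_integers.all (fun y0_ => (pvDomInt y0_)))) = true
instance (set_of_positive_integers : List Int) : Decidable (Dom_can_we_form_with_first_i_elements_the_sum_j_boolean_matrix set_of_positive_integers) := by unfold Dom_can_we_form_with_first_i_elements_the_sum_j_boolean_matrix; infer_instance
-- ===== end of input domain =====

-- B replaces the cell-by-cell DP recurrence with a running set of reachable sums (capped at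
-- total_sum//2), emitting each row as a membership vector; objective: alternative algorithm.

-- ===== PORT A =====
-- row `first_elements` from the previous row: new[cs] = prev[cs] or (e ≤ cs and prev[cs-e])
def pvRowA (cap1 : Int) (prev : List Bool) (e : Int) : List Bool :=
  (PySem.List.pyRange 0 cap1 1).map (fun cs =>
    let b := PySem.List.pyGetD prev cs false
    if e ≤ cs then b || PySem.List.pyGetD prev (cs - e) false else b)

-- the outer loop over first_elements = 1 .. n, row by row
def pvRowsA (cap1 : Int) (prev : List Bool) : List Int → List (List Bool)
  | [] => []
  | e :: rest => pvRowA cap1 prev e :: pvRowsA cap1 (pvRowA cap1 prev e) rest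

def can_we_form_with_first_i_elements_the_sum_j_boolean_matrix (set_of_positive_integers : List Int) : List (List Bool) :=
  let cap1 := PySem.Int.floordiv set_of_positive_integers.sum 2 + 1
  -- row 0: all False, then matrix[0][0] = True (Python raises here when the row is empty; Pre_ excludes that)
  let row0 := ((PySem.List.pyRange 0 cap1 1).map (fun _ => false)).set 0 true
  row0 :: pvRowsA cap1 row0 set_of_positive_integers

-- ===== PORT B =====
-- reachable |= {r + e for r in reachable if r + e <= cap}
def pvStepB (cap : Int) (S : PySem.Set Int) (e : Int) : PySem.Set Int :=
  PySem.Set.update S ((S.filter (fun r => decide (r + e ≤ cap))).map (fun r => r + e))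

-- [j in reachable for j in range(cap + 1)]
def pvMemRow (cap : Int) (S : PySem.Set Int) : List Bool :=
  (PySem.List.pyRange 0 (cap + 1) 1).map (fun j => PySem.Set.contains S j)

def pvRowsB (cap : Int) (S : PySem.Set Int) : List Int → List (List Bool)
  | [] => []
  | e :: rest => pvMemRow cap (pvStepB cap S e) :: pvRowsB cap (pvStepB cap S e) rest

def can_we_form_with_first_i_elements_the_sum_j_boolean_matrix_alt (set_of_positive_integers : List Int) : List (List Bool) :=
  let cap := PySem.Int.floordiv set_of_positive_integers.sum 2
  let reachable : PySem.Set Int := PySem.Set.ofList [0]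
  pvMemRow cap reachable :: pvRowsB cap reachable set_of_positive_integers

-- ===== PRECONDITION & SPEC =====
-- Pre_ excludes lists containing a negative element (the function's stated domain is positive
-- integers): there A raises IndexError (matrix[0][0] on an empty row when the sum is negative,
-- or a read past the row end), except in rare or-short-circuit cases such as [1, -1] where the
-- matrix it returns is an accident of the short circuit.
def Pre_can_we_form_with_first_i_elements_the_sum_j_boolean_matrix (set_of_positive_integers : List Int) : Prop :=
  ∀ x ∈ set_of_positive_integers, 0 ≤ x
instance (set_of_positive_integers : List Int) : Decidable (Pre_can_we_form_with_first_i_elements_the_sum_j_boolean_matrix set_of_positive_integers) := by unfold Pre_can_we_form_with_first_i_elements_the_sum_j_boolean_matrix; infer_instance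

def pvWitness_can_we_form_with_first_i_elements_the_sum_j_boolean_matrix : List Int := [1, 2, 3]

def Spec_can_we_form_with_first_i_elements_the_sum_j_boolean_matrix (set_of_positive_integers : List Int) (out : List (List Bool)) : Prop := out = can_we_form_with_first_i_elements_the_sum_j_boolean_matrix_alt set_of_positive_integers
instance (set_of_positive_integers : List Int) (out : List (List Bool)) : Decidable (Spec_can_we_form_with_first_i_elements_the_sum_j_boolean_matrix set_of_positive_integers out) := by unfold Spec_can_we_form_with_first_i_elements_the_sum_j_boolean_matrix; infer_instance

-- ===== CLAIM (what is proved, stated in full; the proofs are below) =====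
def Claim_equal_can_we_form_with_first_i_elements_the_sum_j_boolean_matrix : Prop := ∀ (set_of_positive_integers : List Int), Dom_can_we_form_with_first_i_elements_the_sum_j_boolean_matrix set_of_positive_integers → Pre_can_we_form_with_first_i_elements_the_sum_j_boolean_matrix set_of_positive_integers → Spec_can_we_form_with_first_i_elements_the_sum_j_boolean_matrix set_of_positive_integers (can_we_form_with_first_i_elements_the_sum_j_boolean_matrix set_of_positive_integers)

-- ===== LEMMAS AND PROOFS =====

-- membership in B's updated set
theorem mem_pvStepB (cap : Int) (S : PySem.Set Int) (e j : Int) :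
    j ∈ pvStepB cap S e ↔ j ∈ S ∨ (j - e ∈ S ∧ j ≤ cap) := by
  unfold pvStepB
  rw [PySem.Set.mem_update]
  simp only [List.mem_map, List.mem_filter, decide_eq_true_eq]
  constructor
  · rintro (h | ⟨r, ⟨hr, hle⟩, rfl⟩)
    · exact Or.inl h
    · exact Or.inr ⟨by simpa using hr, hle⟩
  · rintro (h | ⟨hr, hle⟩)
    · exact Or.inl h
    · exact Or.inr ⟨j - e, ⟨hr, by omega⟩, by omega⟩

-- B's step keeps every reachable sum nonnegative
theorem pvStepB_nonneg (cap : Int) (S : PySem.Set Int) (e : Int)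
    (he : 0 ≤ e) (hS : ∀ r ∈ S, 0 ≤ r) : ∀ r ∈ pvStepB cap S e, 0 ≤ r := by
  intro r hr
  rcases (mem_pvStepB cap S e r).1 hr with h | ⟨h, _⟩
  · exact hS r h
  · have := hS _ h; omega

-- one step of A's DP on a membership vector is the membership vector of B's updated set
theorem pvRowA_eq_memRow (cap : Int) (S : PySem.Set Int) (e : Int)
    (he : 0 ≤ e) (hS : ∀ r ∈ S, 0 ≤ r) :
    pvRowA (cap + 1) (pvMemRow cap S) e = pvMemRow cap (pvStepB cap S e) := by
  unfold pvRowA pvMemRow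
  apply List.map_congr_left
  intro j hj
  rw [PySem.List.mem_pyRange_one] at hj
  have hget : PySem.List.pyGetD ((PySem.List.pyRange 0 (cap + 1) 1).map
      (fun j => PySem.Set.contains S j)) j false = PySem.Set.contains S j :=
    PySem.List.pyGetD_map_pyRange_of_nonneg _ _ _ _ hj.1 hj.2
  by_cases hej : e ≤ j
  · have hget2 : PySem.List.pyGetD ((PySem.List.pyRange 0 (cap + 1) 1).map
        (fun j => PySem.Set.contains S j)) (j - e) false = PySem.Set.contains S (j - e) :=
      PySem.List.pyGetD_map_pyRange_of_nonneg _ _ _ _ (by omega) (by omega)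
    simp only [hej, if_pos, hget, hget2]
    rw [Bool.eq_iff_iff]
    simp only [Bool.or_eq_true, PySem.Set.contains_iff, mem_pvStepB]
    constructor
    · rintro (h | h)
      · exact Or.inl h
      · exact Or.inr ⟨h, by omega⟩
    · rintro (h | ⟨h, _⟩)
      · exact Or.inl h
      · exact Or.inr h
  · simp only [hej, if_neg, hget, not_false_iff]
    rw [Bool.eq_iff_iff]
    simp only [PySem.Set.contains_iff, mem_pvStepB]
    constructor
    · exact Or.inl
    · rintro (h | ⟨h, _⟩)
      · exact h
      · exact absurd (hS _ h) (by omega)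

-- the two row-building loops agree, given the invariant
theorem pvRowsA_eq_pvRowsB (cap : Int) (l : List Int) :
    ∀ S : PySem.Set Int, (∀ x ∈ l, 0 ≤ x) → (∀ r ∈ S, 0 ≤ r) →
    pvRowsA (cap + 1) (pvMemRow cap S) l = pvRowsB cap S l := by
  induction l with
  | nil => intro S _ _; rfl
  | cons e rest ih =>
    intro S hl hS
    have he : 0 ≤ e := hl e (by simp)
    have hrow := pvRowA_eq_memRow cap S e he hS
    simp only [pvRowsA, pvRowsB, hrow]
    rw [ih (pvStepB cap S e) (fun x hx => hl x (by simp [hx]))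
        (pvStepB_nonneg cap S e he hS)]

-- row 0: all-False with index 0 set to True = the membership vector of the initial reachable set
theorem pvRow0_eq (cap : Int) (hcap : 0 ≤ cap) :
    ((PySem.List.pyRange 0 (cap + 1) 1).map (fun _ => false)).set 0 true =
    pvMemRow cap (PySem.Set.ofList [0]) := by
  unfold pvMemRow
  rw [PySem.List.pyRange_one_cons (by omega)]
  simp only [List.map_cons, List.set_cons_zero]
  congr 1
  apply List.map_congr_left
  intro j hj
  rw [PySem.List.mem_pyRange_one] at hj
  rw [Bool.eq_iff_iff]
  simp only [PySem.Set.contains_iff, PySem.Set.mem_ofList, List.mem_singleton]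
  constructor
  · intro h; cases h
  · intro h; omega

theorem sum_nonneg_of_forall (l : List Int) (h : ∀ x ∈ l, 0 ≤ x) : 0 ≤ l.sum := by
  induction l with
  | nil => simp
  | cons a t ih =>
    have := h a (by simp)
    have := ih (fun x hx => h x (by simp [hx]))
    simp only [List.sum_cons]; omega

-- ===== VERDICT (by name: the statement is the Claim_ definition above) =====
theorem can_we_form_with_first_i_elements_the_sum_j_boolean_matrix_spec : Claim_equal_can_we_form_with_first_i_elements_the_sum_j_boolean_matrix := by
  intro l _ hpre
  unfold Spec_can_we_form_with_first_i_elements_the_sum_j_boolean_matrix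
  unfold can_we_form_with_first_i_elements_the_sum_j_boolean_matrix
  unfold can_we_form_with_first_i_elements_the_sum_j_boolean_matrix_alt
  have hsum : 0 ≤ l.sum := sum_nonneg_of_forall l hpre
  have hcap : 0 ≤ PySem.Int.floordiv l.sum 2 := by
    rw [PySem.Int.floordiv_eq_ediv_of_pos (by omega)]
    exact Int.ediv_nonneg hsum (by omega)
  set cap := PySem.Int.floordiv l.sum 2 with hcapdef
  have h0 := pvRow0_eq cap hcap
  simp only [h0]
  rw [pvRowsA_eq_pvRowsB cap l (PySem.Set.ofList [0]) hpre
      (by intro r hr; rw [PySem.Set.mem_ofList] at hr; simp at hr; omega)]
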